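-- pv_equiv track=rewrite | github.com/YuuuuBin2k5/MazePaint | src/func_algorithm.py | manhattan_distance_heuristic
-- ===== SOURCE A (Python) =====
-- def manhattan_distance_heuristic(player_pos, painted_tiles, maze):
--     """
--     Heuristic hiệu quả hơn: Tìm khoảng cách Manhattan đến ô chưa được tô xa nhất.
--     """
--     unpainted_coords = []
--     # Tìm tất cả các ô chưa được tô
--     for r, row_data in enumerate(maze):
--         for c, tile in enumerate(row_data):
--             if tile == 0 and (r, c) not in painted_tiles:
--                 unpainted_coords.append((r, c))
--
--     if not unpainted_coords:
--         return 0 # Không còn ô nào để tô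
--
--     max_dist = 0
--     px, py = player_pos
--     # Tìm khoảng cách lớn nhất từ người chơi đến một ô chưa được tô
--     for tx, ty in unpainted_coords:
--         dist = abs(px - tx) + abs(py - ty)
--         if dist > max_dist:
--             max_dist = dist
--
--     return max_dist
-- ===== SOURCE B (Python) =====
-- def manhattan_distance_heuristic(player_pos, painted_tiles, maze):
--     """Single pass keeping four running extremes of r+c and r-c, instead of
--     materialising the unpainted list and scanning it again for distances."""
--     painted = set(painted_tiles)
--     found = False
--     min_s = max_s = min_d = max_d = 0
--     for r, row_data in enumerate(maze):
--         for c, tile in enumerate(row_data):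
--             if tile == 0 and (r, c) not in painted:
--                 s = r + c
--                 d = r - c
--                 if not found:
--                     found = True
--                     min_s = max_s = s
--                     min_d = max_d = d
--                 else:
--                     if s < min_s: min_s = s
--                     if s > max_s: max_s = s
--                     if d < min_d: min_d = d
--                     if d > max_d: max_d = d
--     if not found:
--         return 0
--     px, py = player_pos
--     return max(px + py - min_s, max_s - (px + py),
--                px - py - min_d, max_d - (px - py))
-- ===== Notes on version B (the rewrite author's own statement) =====
-- stated objective: alternative
-- what changed: One pass keeping four running extremes of r+c and r-c (L1 distance = max of four signed coordinate combinations) and a set for painted tiles, instead of building the unpainted list and re-scanning it for the farthest distance.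
import Mathlib
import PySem

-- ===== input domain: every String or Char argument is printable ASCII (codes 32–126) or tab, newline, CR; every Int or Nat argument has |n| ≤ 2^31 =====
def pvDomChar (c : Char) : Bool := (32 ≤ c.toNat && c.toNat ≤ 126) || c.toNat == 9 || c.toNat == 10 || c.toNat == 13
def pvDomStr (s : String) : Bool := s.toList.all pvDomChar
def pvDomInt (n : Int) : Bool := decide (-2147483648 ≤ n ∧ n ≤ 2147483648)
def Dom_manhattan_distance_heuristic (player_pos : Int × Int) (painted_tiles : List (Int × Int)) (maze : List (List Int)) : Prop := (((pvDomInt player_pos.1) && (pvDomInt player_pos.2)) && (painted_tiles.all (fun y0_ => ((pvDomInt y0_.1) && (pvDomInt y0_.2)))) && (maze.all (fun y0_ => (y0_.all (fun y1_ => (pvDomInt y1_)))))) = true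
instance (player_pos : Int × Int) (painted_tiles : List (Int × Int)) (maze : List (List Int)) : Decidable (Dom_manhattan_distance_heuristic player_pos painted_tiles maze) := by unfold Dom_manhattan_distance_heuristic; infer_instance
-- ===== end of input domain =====

-- B replaces A's two-phase scan (collect the unpainted list, then re-scan it for the
-- farthest Manhattan distance) by one pass keeping four running extremes of r+c and r-c
-- and a set for painted tiles (objective: alternative).

-- ===== PORT A =====
def manhattan_distance_heuristic (player_pos : Int × Int) (painted_tiles : List (Int × Int)) (maze : List (List Int)) : Int :=
  let unpainted_coords :=
    (PySem.List.enumerate maze).foldl (fun acc rrow =>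
      (PySem.List.enumerate rrow.2).foldl (fun acc2 ct =>
        if ct.2 = 0 ∧ (rrow.1, ct.1) ∉ painted_tiles then acc2 ++ [(rrow.1, ct.1)] else acc2) acc) []
  if unpainted_coords = [] then 0
  else
    let px := player_pos.1
    let py := player_pos.2
    unpainted_coords.foldl (fun max_dist t =>
      if |px - t.1| + |py - t.2| > max_dist then |px - t.1| + |py - t.2| else max_dist) 0

-- ===== PORT B =====
def manhattan_distance_heuristic_alt (player_pos : Int × Int) (painted_tiles : List (Int × Int)) (maze : List (List Int)) : Int :=
  let painted := PySem.Set.ofList painted_tiles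
  let st :=
    (PySem.List.enumerate maze).foldl (fun st rrow =>
      (PySem.List.enumerate rrow.2).foldl (fun st2 ct =>
        if ct.2 = 0 ∧ (rrow.1, ct.1) ∉ painted then
          match st2 with
          | none => some (rrow.1 + ct.1, rrow.1 + ct.1, rrow.1 - ct.1, rrow.1 - ct.1)
          | some (min_s, max_s, min_d, max_d) =>
              some (min min_s (rrow.1 + ct.1), max max_s (rrow.1 + ct.1),
                    min min_d (rrow.1 - ct.1), max max_d (rrow.1 - ct.1))
        else st2) st) (none : Option (Int × Int × Int × Int))
  match st with
  | none => 0
  | some (min_s, max_s, min_d, max_d) =>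
    let px := player_pos.1
    let py := player_pos.2
    max (max (px + py - min_s) (max_s - (px + py))) (max (px - py - min_d) (max_d - (px - py)))

-- ===== PRECONDITION & SPEC =====
def Spec_manhattan_distance_heuristic (player_pos : Int × Int) (painted_tiles : List (Int × Int)) (maze : List (List Int)) (out : Int) : Prop := out = manhattan_distance_heuristic_alt player_pos painted_tiles maze
instance (player_pos : Int × Int) (painted_tiles : List (Int × Int)) (maze : List (List Int)) (out : Int) : Decidable (Spec_manhattan_distance_heuristic player_pos painted_tiles maze out) := by unfold Spec_manhattan_distance_heuristic; infer_instance

-- ===== CLAIM (what is proved, stated in full; the proofs are below) =====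
def Claim_equal_manhattan_distance_heuristic : Prop := ∀ (player_pos : Int × Int) (painted_tiles : List (Int × Int)) (maze : List (List Int)), Dom_manhattan_distance_heuristic player_pos painted_tiles maze → Spec_manhattan_distance_heuristic player_pos painted_tiles maze (manhattan_distance_heuristic player_pos painted_tiles maze)

-- ===== LEMMAS AND PROOFS =====

-- the unpainted coordinates contributed by one enumerated row E at row index r
def pvRowU (pt : List (Int × Int)) (r : Int) (E : List (Int × Int)) : List (Int × Int) :=
  (E.filter (fun ct => decide (ct.2 = 0 ∧ (r, ct.1) ∉ pt))).map fun ct => (r, ct.1)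

-- B's state update, as one function of the coordinate pair
def pvUpd (st : Option (Int × Int × Int × Int)) (t : Int × Int) : Option (Int × Int × Int × Int) :=
  match st with
  | none => some (t.1 + t.2, t.1 + t.2, t.1 - t.2, t.1 - t.2)
  | some (ms, Ms, md, Md) => some (min ms (t.1 + t.2), max Ms (t.1 + t.2), min md (t.1 - t.2), max Md (t.1 - t.2))

-- B's closing formula
def pvF (px py ms Ms md Md : Int) : Int :=
  max (max (px + py - ms) (Ms - (px + py))) (max (px - py - md) (Md - (px - py)))

theorem pv_innerA (pt : List (Int × Int)) (r : Int) :
    ∀ (E : List (Int × Int)) (acc : List (Int × Int)),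
      E.foldl (fun acc2 ct => if ct.2 = 0 ∧ (r, ct.1) ∉ pt then acc2 ++ [(r, ct.1)] else acc2) acc
      = acc ++ pvRowU pt r E := by
  intro E
  induction E with
  | nil => intro acc; simp [pvRowU]
  | cons e E ih =>
    intro acc
    by_cases h : e.2 = 0 ∧ (r, e.1) ∉ pt <;>
      simp [pvRowU, h, ih, List.append_assoc]

theorem pv_outerA (pt : List (Int × Int)) :
    ∀ (L : List (Int × List Int)) (acc : List (Int × Int)),
      L.foldl (fun acc rrow =>
        (PySem.List.enumerate rrow.2).foldl (fun acc2 ct =>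
          if ct.2 = 0 ∧ (rrow.1, ct.1) ∉ pt then acc2 ++ [(rrow.1, ct.1)] else acc2) acc) acc
      = acc ++ L.flatMap (fun rrow => pvRowU pt rrow.1 (PySem.List.enumerate rrow.2)) := by
  intro L acc
  simp only [pv_innerA]
  exact PySem.List.foldl_append_eq_flatMap _ L acc

theorem pv_innerB (pt : List (Int × Int)) (r : Int) :
    ∀ (E : List (Int × Int)) (st : Option (Int × Int × Int × Int)),
      E.foldl (fun st2 ct =>
        if ct.2 = 0 ∧ (r, ct.1) ∉ pt then
          match st2 with
          | none => some (r + ct.1, r + ct.1, r - ct.1, r - ct.1)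
          | some (min_s, max_s, min_d, max_d) =>
              some (min min_s (r + ct.1), max max_s (r + ct.1),
                    min min_d (r - ct.1), max max_d (r - ct.1))
        else st2) st
      = (pvRowU pt r E).foldl pvUpd st := by
  intro E
  induction E with
  | nil => intro st; simp [pvRowU]
  | cons e E ih =>
    intro st
    by_cases h : e.2 = 0 ∧ (r, e.1) ∉ pt <;>
      simp only [List.foldl_cons, pvRowU, List.filter_cons, h, decide_false,
        if_neg, not_false_iff, ih] <;> simp [pvUpd]

theorem pv_foldl_flatMap {α β γ : Type} (g : α → List β) (f : γ → β → γ) :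
    ∀ (L : List α) (init : γ), L.foldl (fun a x => (g x).foldl f a) init = (L.flatMap g).foldl f init := by
  intro L
  induction L with
  | nil => intro init; rfl
  | cons l L ih => intro init; simp [List.foldl_append, ih]

theorem pv_outerB (pt : List (Int × Int)) :
    ∀ (L : List (Int × List Int)) (st : Option (Int × Int × Int × Int)),
      L.foldl (fun st rrow =>
        (PySem.List.enumerate rrow.2).foldl (fun st2 ct =>
          if ct.2 = 0 ∧ (rrow.1, ct.1) ∉ pt then
            match st2 with
            | none => some (rrow.1 + ct.1, rrow.1 + ct.1, rrow.1 - ct.1, rrow.1 - ct.1)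
            | some (min_s, max_s, min_d, max_d) =>
                some (min min_s (rrow.1 + ct.1), max max_s (rrow.1 + ct.1),
                      min min_d (rrow.1 - ct.1), max max_d (rrow.1 - ct.1))
          else st2) st) st
      = (L.flatMap (fun rrow => pvRowU pt rrow.1 (PySem.List.enumerate rrow.2))).foldl pvUpd st := by
  intro L st
  simp only [pv_innerB]
  exact pv_foldl_flatMap _ _ L st

theorem pv_fold_upd_some :
    ∀ (W : List (Int × Int)) (ms Ms md Md : Int),
      W.foldl pvUpd (some (ms, Ms, md, Md))
      = some (W.foldl (fun m t => min m (t.1 + t.2)) ms, W.foldl (fun m t => max m (t.1 + t.2)) Ms,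
              W.foldl (fun m t => min m (t.1 - t.2)) md, W.foldl (fun m t => max m (t.1 - t.2)) Md) := by
  intro W
  induction W with
  | nil => intro ms Ms md Md; rfl
  | cons u W ih => intro ms Ms md Md; simp only [List.foldl_cons, pvUpd, ih]

theorem pv_abs4 (px py tx ty : Int) :
    |px - tx| + |py - ty| = pvF px py (tx + ty) (tx + ty) (tx - ty) (tx - ty) := by
  unfold pvF
  rcases abs_cases (px - tx) with ⟨h1, h2⟩ | ⟨h1, h2⟩ <;>
    rcases abs_cases (py - ty) with ⟨h3, h4⟩ | ⟨h3, h4⟩ <;> omega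

theorem pv_minsub (A x y : Int) : max (A - x) (A - y) = A - min x y := by omega

theorem pv_maxsub (A x y : Int) : max (x - A) (y - A) = max x y - A := by omega

theorem pv_step (px py ms Ms md Md tx ty : Int) :
    max (pvF px py ms Ms md Md) (|px - tx| + |py - ty|)
    = pvF px py (min ms (tx + ty)) (max Ms (tx + ty)) (min md (tx - ty)) (max Md (tx - ty)) := by
  rw [pv_abs4]
  unfold pvF
  rw [max_max_max_comm (max (px + py - ms) (Ms - (px + py))),
      max_max_max_comm (px + py - ms), max_max_max_comm (px - py - md),
      pv_minsub, pv_maxsub, pv_minsub, pv_maxsub]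

theorem pv_fold_max_F (px py : Int) :
    ∀ (W : List (Int × Int)) (ms Ms md Md : Int),
      W.foldl (fun m t => max m (|px - t.1| + |py - t.2|)) (pvF px py ms Ms md Md)
      = pvF px py (W.foldl (fun m t => min m (t.1 + t.2)) ms) (W.foldl (fun m t => max m (t.1 + t.2)) Ms)
                  (W.foldl (fun m t => min m (t.1 - t.2)) md) (W.foldl (fun m t => max m (t.1 - t.2)) Md) := by
  intro W
  induction W with
  | nil => intro ms Ms md Md; rfl
  | cons u W ih => intro ms Ms md Md; simp only [List.foldl_cons, pv_step, ih]

theorem pv_stepfun (px py : Int) :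
    (fun (max_dist : Int) (t : Int × Int) =>
        if |px - t.1| + |py - t.2| > max_dist then |px - t.1| + |py - t.2| else max_dist)
    = fun max_dist t => max max_dist (|px - t.1| + |py - t.2|) := by
  funext m t
  simp only [gt_iff_lt, Int.max_def]
  split_ifs <;> omega

-- ===== VERDICT (by name: the statement is the Claim_ definition above) =====
theorem manhattan_distance_heuristic_spec : Claim_equal_manhattan_distance_heuristic := by
  intro pp pt maze _dom
  unfold Spec_manhattan_distance_heuristic
  unfold manhattan_distance_heuristic manhattan_distance_heuristic_alt
  simp only [PySem.Set.mem_ofList, pv_outerA, pv_outerB, List.nil_append]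
  cases hW : (PySem.List.enumerate maze).flatMap
      (fun rrow => pvRowU pt rrow.1 (PySem.List.enumerate rrow.2)) with
  | nil => simp
  | cons u W =>
    simp only [List.foldl_cons, reduceCtorEq, if_false, pv_stepfun]
    have h0 : pvUpd none u = some (u.1 + u.2, u.1 + u.2, u.1 - u.2, u.1 - u.2) := rfl
    rw [h0, pv_fold_upd_some]
    have hfu : max 0 (|pp.1 - u.1| + |pp.2 - u.2|) = |pp.1 - u.1| + |pp.2 - u.2| :=
      max_eq_right (by positivity)
    rw [hfu, pv_abs4 pp.1 pp.2 u.1 u.2, pv_fold_max_F]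
    rfl
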